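-- pv_equiv track=rewrite | github.com/ProjektQ12/StockBroker | app.py | determine_actual_interval_and_period
-- ===== SOURCE A (Python) =====
-- AVAILABLE_PERIODS = [
--     ("5d", "5 Tage"), ("1mo", "1 Monat"), ("3mo", "3 Monate"),
--     ("6mo", "6 Monate"), ("1y", "1 Jahr"), ("2y", "2 Jahre"),
--     ("5y", "5 Jahre"), ("ytd", "Seit Jahresbeginn"), ("max", "Maximal")
-- ]
--
-- AVAILABLE_QUALITIES = [
--     ("high", "Hoch"), ("normal", "Normal"), ("low", "Niedrig")
-- ]
--
-- def determine_actual_interval_and_period(selected_period, selected_quality):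
--     actual_period = selected_period
--     adjustment_note = None
--     if selected_period == "5d":
--         if selected_quality == "high": actual_interval = "1m"
--         elif selected_quality == "normal": actual_interval = "5m"
--         else: actual_interval = "15m"
--     elif selected_period == "1mo":
--         if selected_quality == "high": actual_interval = "5m"
--         elif selected_quality == "normal": actual_interval = "30m"
--         else: actual_interval = "1h"
--     elif selected_period == "3mo":
--         if selected_quality == "high": actual_interval = "30m"
--         elif selected_quality == "normal": actual_interval = "1h"
--         else: actual_interval = "1d"
--     elif selected_period in ["6mo", "ytd"]:
--         if selected_quality == "high": actual_interval = "1h"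
--         elif selected_quality == "normal": actual_interval = "1d"
--         else: actual_interval = "1wk"
--     elif selected_period in ["1y", "2y"]:
--         if selected_quality == "high": actual_interval = "1d"
--         elif selected_quality == "normal": actual_interval = "1wk"
--         else: actual_interval = "1mo"
--     elif selected_period in ["5y", "max"]:
--         if selected_quality == "high": actual_interval = "1wk"
--         elif selected_quality == "normal": actual_interval = "1mo"
--         else: actual_interval = "3mo"
--     else: actual_interval = "1d" # Default
--
--     # Anpassungen basierend auf yfinance Limits für Intervalle
--     original_period_for_note = actual_period
--     # Für 1 m Intervall: max. 7 Tage, aber yfinance sagt oft 5d sei besser für 1 m.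
--     # yfinance erlaubt 1 m für bis zu 7 Tage, aber Daten sind intraday und haben nur für 5 Handelstage lückenlos.
--     # Für die feinsten Auflösungen:
--     if actual_interval == "1m" and actual_period not in ["1d", "2d", "3d", "4d", "5d", "7d"]: # Max 7d for 1m data
--         actual_period = "5d" # Sicherer Standard für 1 m
--     # Für Intervalle <60m: Daten sind für die letzten 60 Tage verfügbar
--     elif actual_interval in ["2m", "5m", "15m", "30m"] and actual_period not in ["1d", "5d", "1mo", "2mo", "60d"]:
--          if selected_period == "3mo" or selected_period == "6mo": actual_period = "2mo" # yf max 60d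
--          elif selected_period not in ["1d", "5d", "1mo"]: actual_period = "2mo" # yf max 60d
--     # Für stündliche Intervalle (1h, 60m, 90m): Daten sind für die letzten 730 Tage (ca. 2 Jahre) verfügbar
--     elif actual_interval in ["60m", "90m", "1h"] and actual_period not in ["1d", "5d", "1mo", "3mo", "6mo", "1y", "2y", "ytd", "730d"]:
--         if selected_period in ["5y", "max"]: actual_period = "2y" # yf max 730d
--
--     if original_period_for_note != actual_period:
--         period_display_original = next((p[1] for p in AVAILABLE_PERIODS if p[0] == original_period_for_note), original_period_for_note)
--         period_display_actual = next((p[1] for p in AVAILABLE_PERIODS if p[0] == actual_period), actual_period)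
--         quality_display = next((q[1] for q in AVAILABLE_QUALITIES if q[0] == selected_quality), selected_quality)
--         adjustment_note = (f"Hinweis: Zeitraum für Qualität '{quality_display}' und ursprüngliche Auswahl '{period_display_original}' "
--                            f"auf '{period_display_actual}' angepasst, um Intervall '{actual_interval}' zu unterstützen.")
--     return actual_period, actual_interval, adjustment_note
-- ===== SOURCE B (Python) =====
-- _INTERVAL_TABLE = {
--     "5d":  ("1m", "5m", "15m"),
--     "1mo": ("5m", "30m", "1h"),
--     "3mo": ("30m", "1h", "1d"),
--     "6mo": ("1h", "1d", "1wk"),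
--     "ytd": ("1h", "1d", "1wk"),
--     "1y":  ("1d", "1wk", "1mo"),
--     "2y":  ("1d", "1wk", "1mo"),
--     "5y":  ("1wk", "1mo", "3mo"),
--     "max": ("1wk", "1mo", "3mo"),
-- }
--
-- # The only period/quality combination whose interval exceeds a yfinance limit is
-- # ("3mo", "high") -> 30m intraday data capped at 60 days, so the period shrinks to "2mo".
-- _ADJ_NOTE = ("Hinweis: Zeitraum für Qualität 'Hoch' und ursprüngliche Auswahl '3 Monate' "
--              "auf '2mo' angepasst, um Intervall '30m' zu unterstützen.")
--
-- def determine_actual_interval_and_period(selected_period, selected_quality):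
--     if selected_period == "3mo" and selected_quality == "high":
--         return "2mo", "30m", _ADJ_NOTE
--     idx = {"high": 0, "normal": 1}.get(selected_quality, 2)
--     interval = _INTERVAL_TABLE.get(selected_period, ("1d", "1d", "1d"))[idx]
--     return selected_period, interval, None
-- ===== Notes on version B (the rewrite author's own statement) =====
-- stated objective: simpler
-- what changed: Replaces A's nine-way if/elif interval cascade plus three conditional yfinance-limit adjustment branches and a note built from three list scans by a single period->(high,normal,low) lookup table and the one special case ('3mo','high') that the limit branches can actually fire on, with the note as a constant.
import Mathlib
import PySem

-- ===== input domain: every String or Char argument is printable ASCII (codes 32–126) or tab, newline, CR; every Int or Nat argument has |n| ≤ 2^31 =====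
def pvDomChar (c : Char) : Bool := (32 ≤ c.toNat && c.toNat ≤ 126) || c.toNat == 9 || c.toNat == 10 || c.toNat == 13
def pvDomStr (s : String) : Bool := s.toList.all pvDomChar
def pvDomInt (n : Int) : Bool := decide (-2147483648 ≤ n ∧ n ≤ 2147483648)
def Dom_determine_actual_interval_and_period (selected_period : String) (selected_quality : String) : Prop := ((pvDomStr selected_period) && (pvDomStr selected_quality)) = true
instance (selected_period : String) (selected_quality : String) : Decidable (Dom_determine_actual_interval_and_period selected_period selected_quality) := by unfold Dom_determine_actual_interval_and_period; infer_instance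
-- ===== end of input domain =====

-- B replaces A's nine-way if/elif interval cascade and the three yfinance-limit
-- adjustment branches by a period→(high,normal,low) lookup table plus the single
-- combination ("3mo","high") that those limit branches can actually change (objective: simpler).

-- ===== PORT A =====
def pvAvailablePeriods : List (String × String) :=
  [("5d", "5 Tage"), ("1mo", "1 Monat"), ("3mo", "3 Monate"),
   ("6mo", "6 Monate"), ("1y", "1 Jahr"), ("2y", "2 Jahre"),
   ("5y", "5 Jahre"), ("ytd", "Seit Jahresbeginn"), ("max", "Maximal")]

def pvAvailableQualities : List (String × String) :=
  [("high", "Hoch"), ("normal", "Normal"), ("low", "Niedrig")]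

-- next((p[1] for p in lst if p[0] == key), key)
def pvDisplay (lst : List (String × String)) (key : String) : String :=
  ((lst.find? (fun p => p.1 == key)).map (fun p => p.2)).getD key

def determine_actual_interval_and_period (selected_period : String) (selected_quality : String) : String × String × Option String :=
  let actual_period := selected_period
  let actual_interval :=
    if selected_period == "5d" then
      (if selected_quality == "high" then "1m"
       else if selected_quality == "normal" then "5m" else "15m")
    else if selected_period == "1mo" then
      (if selected_quality == "high" then "5m"
       else if selected_quality == "normal" then "30m" else "1h")
    else if selected_period == "3mo" then
      (if selected_quality == "high" then "30m"
       else if selected_quality == "normal" then "1h" else "1d")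
    else if selected_period ∈ ["6mo", "ytd"] then
      (if selected_quality == "high" then "1h"
       else if selected_quality == "normal" then "1d" else "1wk")
    else if selected_period ∈ ["1y", "2y"] then
      (if selected_quality == "high" then "1d"
       else if selected_quality == "normal" then "1wk" else "1mo")
    else if selected_period ∈ ["5y", "max"] then
      (if selected_quality == "high" then "1wk"
       else if selected_quality == "normal" then "1mo" else "3mo")
    else "1d"
  let original_period_for_note := actual_period
  let actual_period :=
    if actual_interval == "1m" && !(actual_period ∈ ["1d", "2d", "3d", "4d", "5d", "7d"]) then
      "5d"
    else if actual_interval ∈ ["2m", "5m", "15m", "30m"] && !(actual_period ∈ ["1d", "5d", "1mo", "2mo", "60d"]) then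
      (if selected_period == "3mo" || selected_period == "6mo" then "2mo"
       else if !(selected_period ∈ ["1d", "5d", "1mo"]) then "2mo"
       else actual_period)
    else if actual_interval ∈ ["60m", "90m", "1h"] && !(actual_period ∈ ["1d", "5d", "1mo", "3mo", "6mo", "1y", "2y", "ytd", "730d"]) then
      (if selected_period ∈ ["5y", "max"] then "2y" else actual_period)
    else actual_period
  let adjustment_note : Option String :=
    if original_period_for_note != actual_period then
      some ("Hinweis: Zeitraum für Qualität '" ++ pvDisplay pvAvailableQualities selected_quality
            ++ "' und ursprüngliche Auswahl '" ++ pvDisplay pvAvailablePeriods original_period_for_note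
            ++ "' auf '" ++ pvDisplay pvAvailablePeriods actual_period
            ++ "' angepasst, um Intervall '" ++ actual_interval ++ "' zu unterstützen.")
    else none
  (actual_period, actual_interval, adjustment_note)

-- ===== PORT B =====
-- B's dict literal, ported as an association list (first-match lookup = dict lookup; keys are distinct)
def pvIntervalTable : List (String × (String × String × String)) :=
  [("5d", ("1m", "5m", "15m")),
   ("1mo", ("5m", "30m", "1h")),
   ("3mo", ("30m", "1h", "1d")),
   ("6mo", ("1h", "1d", "1wk")),
   ("ytd", ("1h", "1d", "1wk")),
   ("1y", ("1d", "1wk", "1mo")),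
   ("2y", ("1d", "1wk", "1mo")),
   ("5y", ("1wk", "1mo", "3mo")),
   ("max", ("1wk", "1mo", "3mo"))]

def pvAdjNote : String :=
  "Hinweis: Zeitraum für Qualität 'Hoch' und ursprüngliche Auswahl '3 Monate' auf '2mo' angepasst, um Intervall '30m' zu unterstützen."

def determine_actual_interval_and_period_alt (selected_period : String) (selected_quality : String) : String × String × Option String :=
  if selected_period == "3mo" && selected_quality == "high" then
    ("2mo", "30m", some pvAdjNote)
  else
    let idx : Nat := if selected_quality == "high" then 0 else if selected_quality == "normal" then 1 else 2
    let t := ((pvIntervalTable.find? (fun e => e.1 == selected_period)).map (fun e => e.2)).getD ("1d", "1d", "1d")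
    let interval := if idx = 0 then t.1 else if idx = 1 then t.2.1 else t.2.2
    (selected_period, interval, none)

-- ===== PRECONDITION & SPEC =====
def Spec_determine_actual_interval_and_period (selected_period : String) (selected_quality : String) (out : String × String × Option String) : Prop := out = determine_actual_interval_and_period_alt selected_period selected_quality
instance (selected_period : String) (selected_quality : String) (out : String × String × Option String) : Decidable (Spec_determine_actual_interval_and_period selected_period selected_quality out) := by unfold Spec_determine_actual_interval_and_period; infer_instance

-- ===== CLAIM (what is proved, stated in full; the proofs are below) =====
def Claim_equal_determine_actual_interval_and_period : Prop := ∀ (selected_period : String) (selected_quality : String), Dom_determine_actual_interval_and_period selected_period selected_quality → Spec_determine_actual_interval_and_period selected_period selected_quality (determine_actual_interval_and_period selected_period selected_quality)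

-- ===== LEMMAS AND PROOFS =====

-- ===== VERDICT (by name: the statement is the Claim_ definition above) =====
theorem determine_actual_interval_and_period_spec : Claim_equal_determine_actual_interval_and_period := by
  intro p q _
  unfold Spec_determine_actual_interval_and_period determine_actual_interval_and_period determine_actual_interval_and_period_alt
  by_cases hp5d : p = "5d" <;> by_cases hp1mo : p = "1mo" <;> by_cases hp3mo : p = "3mo" <;>
    by_cases hp6mo : p = "6mo" <;> by_cases hpytd : p = "ytd" <;> by_cases hp1y : p = "1y" <;>
    by_cases hp2y : p = "2y" <;> by_cases hp5y : p = "5y" <;> by_cases hpmax : p = "max" <;>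
    by_cases hqh : q = "high" <;> by_cases hqn : q = "normal" <;>
    simp_all [pvDisplay, pvAvailablePeriods, pvAvailableQualities, pvIntervalTable, pvAdjNote, List.find?] <;>
    simp only [beq_eq_false_iff_ne.mpr (Ne.symm hp5d), beq_eq_false_iff_ne.mpr (Ne.symm hp1mo),
      beq_eq_false_iff_ne.mpr (Ne.symm hp3mo), beq_eq_false_iff_ne.mpr (Ne.symm hp6mo),
      beq_eq_false_iff_ne.mpr (Ne.symm hpytd), beq_eq_false_iff_ne.mpr (Ne.symm hp1y),
      beq_eq_false_iff_ne.mpr (Ne.symm hp2y), beq_eq_false_iff_ne.mpr (Ne.symm hp5y),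
      beq_eq_false_iff_ne.mpr (Ne.symm hpmax), Option.map, Option.getD]
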